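-- pv_equiv track=rewrite | github.com/ahmed91abbas/advent-of-code | 2023/day14/1.py | move_rocks
-- ===== SOURCE A (Python) =====
-- def move_rocks(line):
--     indices = [x for x in range(len(line)) if line[x] == "O"]
--     new_line = line
--     for index in indices:
--         next_stop = new_line[index:].find("#")
--         if next_stop == -1:
--             next_stop = len(new_line[index:])
--         chunk = new_line[index : index + next_stop]
--         last_dot = chunk.rfind(".")
--         if last_dot != -1:
--             new_line = new_line[:index] + "." + new_line[index + 1 :]
--             new_line = new_line[: index + last_dot] + "O" + new_line[index + last_dot + 1 :]
--     return new_line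
-- ===== SOURCE B (Python) =====
-- def move_rocks(line):
--     # One pass over the '#'-separated segments: within each segment the settled
--     # configuration is just "all the dots, then all the rocks" on the '.'/'O'
--     # slots (other characters stay put), so count the dots and emit directly.
--     # A segment with no rock or no dot cannot change, and is copied as a whole.
--     out = []
--     rest = line
--     while True:
--         seg, sep, rest = rest.partition('#')
--         if 'O' not in seg or '.' not in seg:
--             out.append(seg)
--         else:
--             dots = sum(ch == '.' for ch in seg)
--             for ch in seg:
--                 if ch == '.' or ch == 'O':
--                     if dots > 0:
--                         out.append('.')
--                         dots -= 1
--                     else: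
--                         out.append('O')
--                 else:
--                     out.append(ch)
--         if not sep:
--             return ''.join(out)
--         out.append(sep)
-- ===== Notes on version B (the rewrite author's own statement) =====
-- stated objective: faster
-- what changed: Instead of moving each 'O' individually (each move re-scanning and re-splicing the whole string), B makes a single pass over the '#'-separated segments, copying a segment with no rock or no dot unchanged and otherwise emitting its '.'/'O' slots directly with all dots first and the rocks packed at the right end.
import Mathlib
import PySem

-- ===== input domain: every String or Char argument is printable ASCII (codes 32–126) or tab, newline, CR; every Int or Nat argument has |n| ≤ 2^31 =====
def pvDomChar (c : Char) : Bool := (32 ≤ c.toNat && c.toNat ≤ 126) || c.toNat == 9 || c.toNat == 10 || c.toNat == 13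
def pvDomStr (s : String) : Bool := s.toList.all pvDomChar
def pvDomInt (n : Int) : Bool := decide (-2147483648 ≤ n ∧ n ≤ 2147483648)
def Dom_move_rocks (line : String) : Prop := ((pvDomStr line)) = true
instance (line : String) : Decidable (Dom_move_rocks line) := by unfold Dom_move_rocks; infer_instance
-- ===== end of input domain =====

-- B replaces A's per-rock string re-splicing with one pass over the '#'-separated
-- segments, counting dots and emitting the packed segment directly (objective: faster).

-- ===== PORT A =====
def move_rocks_step (new_line : List Char) (index : Int) : List Char :=
  let f := PySem.Chars.find (PySem.List.slice new_line (some index) none) ['#']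
  let next_stop := if f == -1 then PySem.List.len (PySem.List.slice new_line (some index) none) else f
  let chunk := PySem.List.slice new_line (some index) (some (index + next_stop))
  let last_dot := PySem.Chars.rfind chunk ['.']
  if last_dot != -1 then
    let nl := PySem.List.slice new_line none (some index) ++ ['.'] ++ PySem.List.slice new_line (some (index + 1)) none
    PySem.List.slice nl none (some (index + last_dot)) ++ ['O'] ++ PySem.List.slice nl (some (index + last_dot + 1)) none
  else new_line

def move_rocks_chars (cs : List Char) : List Char :=
  let indices := (PySem.List.pyRange 0 (PySem.List.len cs) 1).filter
    (fun x => PySem.List.pyGet? cs x == some 'O')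
  indices.foldl move_rocks_step cs

def move_rocks (line : String) : String := String.ofList (move_rocks_chars line.toList)

-- ===== PORT B =====
def pySegPack (dots : Int) (seg : List Char) : List Char :=
  match seg with
  | [] => []
  | c :: cs =>
    if c == '.' || c == 'O' then
      if dots > 0 then '.' :: pySegPack (dots - 1) cs else 'O' :: pySegPack dots cs
    else c :: pySegPack dots cs

def pySegOut (seg : List Char) : List Char :=
  if !(PySem.Chars.isIn ['O'] seg) || !(PySem.Chars.isIn ['.'] seg) then seg
  else pySegPack ((seg.map (fun ch => if ch == '.' then (1 : Int) else 0)).sum) seg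

def move_rocks_alt_chars (cs : List Char) : List Char :=
  -- str.partition('#'): for the single-char separator this is exactly
  -- (takeWhile (· ≠ '#'), the '#', rest); ported by hand, exact on all inputs
  let seg := cs.takeWhile (fun c => c != '#')
  match h : cs.dropWhile (fun c => c != '#') with
  | [] => pySegOut seg
  | _ :: y => pySegOut seg ++ '#' :: move_rocks_alt_chars y
termination_by cs.length
decreasing_by
  have := List.length_dropWhile_le (fun c => c != '#') cs
  rw [h] at this; simp at this; omega

def move_rocks_alt (line : String) : String := String.ofList (move_rocks_alt_chars line.toList)

-- ===== PRECONDITION & SPEC =====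
def Spec_move_rocks (line : String) (out : String) : Prop := out = move_rocks_alt line
instance (line : String) (out : String) : Decidable (Spec_move_rocks line out) := by unfold Spec_move_rocks; infer_instance

-- ===== CLAIM (what is proved, stated in full; the proofs are below) =====
def Claim_equal_move_rocks : Prop := ∀ (line : String), Dom_move_rocks line → Spec_move_rocks line (move_rocks line)

-- ===== LEMMAS AND PROOFS =====

-- dot count of a segment, exactly as port B computes it
def pvDots (seg : List Char) : Int := ((seg.map (fun ch => if ch == '.' then (1 : Int) else 0)).sum)

-- a '.'/'O' position ("slot"), exactly port B's branch condition
def pvSlot (c : Char) : Bool := c == '.' || c == 'O'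

theorem pv_single_prefix_drop (c : Char) (x : List Char) (i : Nat) :
    [c] <+: x.drop i ↔ x[i]? = some c := by
  rw [show x[i]? = (x.drop i).head? from (List.head?_drop ..).symm]
  constructor
  · rintro ⟨t, h⟩; rw [← h]; rfl
  · intro h; cases hx : x.drop i with
    | nil => rw [hx] at h; simp at h
    | cons a t => rw [hx] at h; simp at h; subst h; exact ⟨t, by simp⟩

theorem pv_find_hash_eq (t : List Char) (m : Nat) (_hm : m < t.length)
    (h1 : ∀ i, i < m → t[i]? ≠ some '#') (h2 : t[m]? = some '#') :
    PySem.Chars.find t ['#'] = (m : Int) := by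
  have hinf : ['#'] <:+: t := (List.singleton_infix_iff _ _).2 (List.mem_of_getElem? h2)
  have hnn : 0 ≤ PySem.Chars.find t ['#'] := (PySem.Chars.find_nonneg_iff t ['#']).2 hinf
  obtain ⟨hp, hmin⟩ := PySem.Chars.find_spec hnn
  rw [pv_single_prefix_drop] at hp
  set j := (PySem.Chars.find t ['#']).toNat with hj
  have : j = m := by
    rcases Nat.lt_trichotomy j m with h | h | h
    · exact absurd hp (h1 _ h)
    · exact h
    · exact absurd ((pv_single_prefix_drop _ _ _).2 h2) (hmin m h)
  omega

theorem pv_find_hash_none (t : List Char)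
    (h : ∀ i : Nat, t[i]? ≠ some '#') :
    PySem.Chars.find t ['#'] = -1 := by
  rw [PySem.Chars.find_eq_neg_one_iff]
  intro hinf
  obtain hm := (List.singleton_infix_iff _ _).1 hinf
  obtain ⟨i, hi, hg⟩ := List.getElem_of_mem hm
  exact h i (by rw [List.getElem?_eq_getElem hi, hg])

theorem pv_rfind_go_none (s : List Char) (j : Nat)
    (h : ∀ k, k ≤ j → s[k]? ≠ some '.') :
    PySem.Chars.rfind.go s ['.'] j = -1 := by
  induction j with
  | zero =>
    simp only [PySem.Chars.rfind.go]
    rw [if_neg]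
    intro hp
    rw [List.isPrefixOf_iff_prefix] at hp
    exact h 0 le_rfl ((pv_single_prefix_drop '.' s 0).1 (by simpa using hp))
  | succ j ih =>
    simp only [PySem.Chars.rfind.go]
    rw [if_neg, ih (fun k hk => h k (Nat.le_succ_of_le hk))]
    intro hp
    rw [List.isPrefixOf_iff_prefix] at hp
    exact h (j+1) le_rfl ((pv_single_prefix_drop '.' s (j+1)).1 hp)

theorem pv_rfind_go_some (s : List Char) (j k : Nat) (hkj : k ≤ j)
    (hk : s[k]? = some '.')
    (hmax : ∀ m, k < m → m ≤ j → s[m]? ≠ some '.') :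
    PySem.Chars.rfind.go s ['.'] j = (k : Int) := by
  induction j with
  | zero =>
    interval_cases k
    simp only [PySem.Chars.rfind.go]
    rw [if_pos (by rw [List.isPrefixOf_iff_prefix]; simpa using (pv_single_prefix_drop '.' s 0).2 hk)]
    simp
  | succ j ih =>
    simp only [PySem.Chars.rfind.go]
    by_cases hkj' : k = j + 1
    · subst hkj'
      rw [if_pos (by rw [List.isPrefixOf_iff_prefix]; exact (pv_single_prefix_drop '.' s (j+1)).2 hk)]
    · rw [if_neg, ih (by omega) (fun m hm hmj => hmax m hm (Nat.le_succ_of_le hmj))]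
      intro hp
      rw [List.isPrefixOf_iff_prefix] at hp
      exact hmax (j+1) (by omega) le_rfl ((pv_single_prefix_drop '.' s (j+1)).1 hp)

theorem pv_step_chunk (t : List Char) (o s : Nat)
    (hos : o ≤ s) (hsl : s ≤ t.length)
    (hnh : ∀ k, o ≤ k → k < s → t[k]? ≠ some '#')
    (hb : s = t.length ∨ t[s]? = some '#') :
    (let f := PySem.Chars.find (PySem.List.slice t (some (o:Int)) none) ['#']
     let next_stop := if f == -1 then PySem.List.len (PySem.List.slice t (some (o:Int)) none) else f
     PySem.List.slice t (some (o:Int)) (some ((o:Int) + next_stop))) = (t.drop o).take (s - o) := by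
  have hdropg : ∀ i : Nat, (t.drop o)[i]? = t[o+i]? := by
    intro i; rw [List.getElem?_drop]
  have hns : (if PySem.Chars.find (PySem.List.slice t (some (o:Int)) none) ['#'] == -1
      then PySem.List.len (PySem.List.slice t (some (o:Int)) none)
      else PySem.Chars.find (PySem.List.slice t (some (o:Int)) none) ['#']) = ((s - o : Nat) : Int) := by
    rw [PySem.List.slice_from_natCast]
    rcases hb with rfl | hs
    · rw [pv_find_hash_none]
      · simp [PySem.List.len_eq]
      · intro i
        rw [hdropg]
        by_cases hi : o + i < t.length
        · exact hnh _ (by omega) (by omega)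
        · rw [List.getElem?_eq_none (by omega)]; simp
    · have hslt : s < t.length := (List.getElem?_eq_some_iff.1 hs).1
      rw [pv_find_hash_eq (t.drop o) (s - o)]
      · simp
      · rw [List.length_drop]; omega
      · intro i hi
        rw [hdropg]
        exact hnh _ (by omega) (by omega)
      · rw [hdropg, show o + (s - o) = s by omega]; exact hs
  simp only [hns]
  rw [show (o:Int) + ((s - o : Nat) : Int) = ((s : Nat) : Int) by omega]
  rw [PySem.List.slice_natCast]

theorem pv_step_none (t : List Char) (o s : Nat)
    (hos : o ≤ s) (hsl : s ≤ t.length)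
    (hnh : ∀ k, o ≤ k → k < s → t[k]? ≠ some '#')
    (hb : s = t.length ∨ t[s]? = some '#')
    (hnd : ∀ k, o ≤ k → k < s → t[k]? ≠ some '.') :
    move_rocks_step t (o : Int) = t := by
  have hchunk := pv_step_chunk t o s hos hsl hnh hb
  simp only at hchunk
  simp only [move_rocks_step, hchunk]
  rw [show PySem.Chars.rfind ((t.drop o).take (s-o)) ['.'] = -1 from ?_]
  · simp
  · unfold PySem.Chars.rfind
    apply pv_rfind_go_none
    intro k _
    by_cases hk : k < s - o
    · rw [List.getElem?_take_of_lt hk, List.getElem?_drop]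
      exact hnd _ (by omega) (by omega)
    · rw [List.getElem?_eq_none]; · simp
      simp; omega

theorem pv_step_some (t : List Char) (o s d : Nat)
    (hos : o ≤ s) (hsl : s ≤ t.length)
    (hnh : ∀ k, o ≤ k → k < s → t[k]? ≠ some '#')
    (hb : s = t.length ∨ t[s]? = some '#')
    (hoO : t[o]? = some 'O')
    (hod : o ≤ d) (hds : d < s) (hd : t[d]? = some '.')
    (hmax : ∀ k, d < k → k < s → t[k]? ≠ some '.') :
    move_rocks_step t (o : Int) = (t.set o '.').set d 'O' := by
  have holt : o < t.length := (List.getElem?_eq_some_iff.1 hoO).1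
  have hdlt : d < t.length := (List.getElem?_eq_some_iff.1 hd).1
  have hchunk := pv_step_chunk t o s hos hsl hnh hb
  simp only at hchunk
  have hclen : ((t.drop o).take (s-o)).length = s - o := by
    simp; omega
  simp only [move_rocks_step, hchunk]
  rw [show PySem.Chars.rfind ((t.drop o).take (s-o)) ['.'] = ((d - o : Nat) : Int) from ?_]
  swap
  · unfold PySem.Chars.rfind
    rw [hclen]
    apply pv_rfind_go_some
    · omega
    · rw [List.getElem?_take_of_lt (by omega), List.getElem?_drop, show o + (d - o) = d by omega]
      exact hd
    · intro m hm hmj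
      by_cases hmlt : m < s - o
      · rw [List.getElem?_take_of_lt hmlt, List.getElem?_drop]
        exact hmax _ (by omega) (by omega)
      · rw [List.getElem?_eq_none]; · simp
        rw [hclen]; omega
  · rw [if_pos (by simp)]
    have hnl : PySem.List.slice t none (some (o:Int)) ++ ['.'] ++ PySem.List.slice t (some ((o:Int) + 1)) none
        = t.set o '.' := by
      rw [PySem.List.slice_to_natCast, show (o:Int) + 1 = ((o+1 : Nat) : Int) by omega,
        PySem.List.slice_from_natCast, List.set_eq_take_cons_drop _ holt]
      simp
    rw [hnl]
    have hnlen : (t.set o '.').length = t.length := by simp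
    rw [show (o:Int) + ((d - o : Nat) : Int) = ((d : Nat) : Int) by omega,
      PySem.List.slice_to_natCast,
      show ((d:Nat):Int) + 1 = ((d+1 : Nat) : Int) by omega,
      PySem.List.slice_from_natCast,
      List.set_eq_take_cons_drop 'O' (by rw [hnlen]; omega)]
    simp

theorem pv_alt_nil (cs : List Char) (h : cs.dropWhile (fun c => c != '#') = []) :
    move_rocks_alt_chars cs = pySegOut (cs.takeWhile (fun c => c != '#')) := by
  rw [move_rocks_alt_chars]
  split
  · rfl
  · rename_i c y hd; rw [h] at hd; cases hd

theorem pv_alt_cons (cs : List Char) (c : Char) (y : List Char)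
    (h : cs.dropWhile (fun c => c != '#') = c :: y) :
    move_rocks_alt_chars cs = pySegOut (cs.takeWhile (fun c => c != '#')) ++ '#' :: move_rocks_alt_chars y := by
  rw [move_rocks_alt_chars]
  split
  · rename_i hd; rw [h] at hd; cases hd
  · rename_i c' y' hd; rw [h] at hd; cases hd; rfl

theorem pv_sum_int_set (l : List Int) (i : Nat) (a : Int) (h : i < l.length) :
    (l.set i a).sum = l.sum - l[i] + a := by
  induction l generalizing i with
  | nil => simp at h
  | cons b bs ih =>
    cases i with
    | zero => simp [List.set]; ring
    | succ j => simp only [List.set, List.sum_cons, List.getElem_cons_succ]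
                rw [ih j (by simpa using h)]; ring

theorem pv_pack_congr (xs ys : List Char)
    (h : List.Forall₂ (fun a b => pvSlot a = pvSlot b ∧ (pvSlot a = false → a = b)) xs ys)
    (n : Int) : pySegPack n xs = pySegPack n ys := by
  induction h generalizing n with
  | nil => rfl
  | cons hab htail ih =>
    rename_i a b as bs
    obtain ⟨hslot, heq⟩ := hab
    simp only [pvSlot] at hslot heq
    simp only [pySegPack]
    rw [hslot]
    by_cases hs : (b == '.' || b == 'O') = true
    · simp only [hs, if_true]
      by_cases hn : n > 0
      · rw [if_pos hn, if_pos hn, ih]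
      · rw [if_neg hn, if_neg hn, ih]
    · have hsf : (b == '.' || b == 'O') = false := by revert hs; cases (b == '.' || b == 'O') <;> simp
      rw [heq (by rw [hslot]; exact hsf)]
      simp only [hsf, ih]

theorem pv_dots_set_set (x : List Char) (o d : Nat) (ho : x[o]? = some 'O') (hd : x[d]? = some '.')
    (hne : o ≠ d) :
    pvDots ((x.set o '.').set d 'O') = pvDots x := by
  have holt : o < x.length := (List.getElem?_eq_some_iff.1 ho).1
  have hdlt : d < x.length := (List.getElem?_eq_some_iff.1 hd).1
  have hoe : x[o] = 'O' := by have := List.getElem?_eq_getElem holt; rw [ho] at this; exact (Option.some_inj.1 this).symm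
  have hde : x[d] = '.' := by have := List.getElem?_eq_getElem hdlt; rw [hd] at this; exact (Option.some_inj.1 this).symm
  unfold pvDots
  rw [List.map_set, List.map_set]
  rw [pv_sum_int_set _ d _ (by simp; omega), pv_sum_int_set _ o _ (by simp; omega)]
  rw [List.getElem_set_ne (by omega) , List.getElem_map, List.getElem_map]
  simp [hoe, hde]

theorem pv_swap_rel (x : List Char) (o d : Nat) (ho : x[o]? = some 'O') (hd : x[d]? = some '.')
    (hne : o ≠ d) :
    List.Forall₂ (fun a b => pvSlot a = pvSlot b ∧ (pvSlot a = false → a = b))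
      ((x.set o '.').set d 'O') x := by
  have holt : o < x.length := (List.getElem?_eq_some_iff.1 ho).1
  have hdlt : d < x.length := (List.getElem?_eq_some_iff.1 hd).1
  have hoe : x[o] = 'O' := by have := List.getElem?_eq_getElem holt; rw [ho] at this; exact (Option.some_inj.1 this).symm
  have hde : x[d] = '.' := by have := List.getElem?_eq_getElem hdlt; rw [hd] at this; exact (Option.some_inj.1 this).symm
  rw [List.forall₂_iff_get]
  refine ⟨by simp, ?_⟩
  intro i h1 h2
  simp only [List.get_eq_getElem]
  by_cases hid : i = d
  · subst hid
    rw [List.getElem_set_self (by simpa using h2), hde]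
    exact ⟨rfl, by intro hc; cases hc⟩
  · by_cases hio : i = o
    · subst hio
      rw [List.getElem_set_ne (fun h => hid h.symm), List.getElem_set_self (by simpa using h2), hoe]
      exact ⟨rfl, by intro hc; cases hc⟩
    · rw [List.getElem_set_ne (fun h => hid h.symm), List.getElem_set_ne (fun h => hio h.symm)]
      exact ⟨rfl, fun _ => rfl⟩

theorem pv_drop_cases (t : List Char) :
    t.dropWhile (fun c => c != '#') = [] ∨ ∃ y, t.dropWhile (fun c => c != '#') = '#' :: y := by
  cases h : t.dropWhile (fun c => c != '#') with
  | nil => exact Or.inl rfl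
  | cons c y =>
    right
    have hne : t.dropWhile (fun c => c != '#') ≠ [] := by rw [h]; simp
    have := List.head_dropWhile_not (fun c => c != '#') hne
    simp only [h] at this
    simp at this
    exact ⟨y, by rw [this]⟩

theorem pv_tw_app (x' r : List Char) (hx : ∀ a ∈ x', (a != '#') = true)
    (hr : r = [] ∨ ∃ y, r = '#' :: y) :
    (x' ++ r).takeWhile (fun c => c != '#') = x' ∧ (x' ++ r).dropWhile (fun c => c != '#') = r := by
  constructor
  · rw [List.takeWhile_append_of_pos hx]
    rcases hr with rfl | ⟨y, rfl⟩
    · simp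
    · simp
  · rw [List.dropWhile_append_of_pos hx]
    rcases hr with rfl | ⟨y, rfl⟩
    · simp
    · simp

theorem pv_dots_nonneg (x : List Char) : 0 ≤ pvDots x := by
  unfold pvDots
  induction x with
  | nil => simp
  | cons c cs ih => simp only [List.map_cons, List.sum_cons]; split <;> omega

theorem pv_dots_zero (x : List Char) (h : ∀ j : Nat, x[j]? ≠ some '.') : pvDots x = 0 := by
  induction x with
  | nil => rfl
  | cons c cs ih =>
    have hc : c ≠ '.' := by
      intro rfl'
      exact h 0 (by rw [rfl']; rfl)
    unfold pvDots
    simp only [List.map_cons, List.sum_cons]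
    rw [if_neg (by simpa using hc)]
    have := ih (fun j => by have := h (j+1); rwa [List.getElem?_cons_succ] at this)
    unfold pvDots at this
    omega

theorem pv_pack_id (x : List Char)
    (h : ∀ p q : Nat, p < q → x[p]? = some 'O' → x[q]? ≠ some '.') :
    pySegPack (pvDots x) x = x := by
  induction x with
  | nil => rfl
  | cons c cs ih =>
    have htail : ∀ p q : Nat, p < q → cs[p]? = some 'O' → cs[q]? ≠ some '.' := by
      intro p q hpq hp
      have := h (p+1) (q+1) (by omega)
      rw [List.getElem?_cons_succ, List.getElem?_cons_succ] at this
      exact this hp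
    by_cases hdot : c = '.'
    · subst hdot
      have hpos : pvDots ('.' :: cs) = 1 + pvDots cs := by
        unfold pvDots; simp
      simp only [pySegPack]
      rw [if_pos (by simp)]
      have h0 := pv_dots_nonneg cs
      rw [if_pos (by omega), hpos]
      rw [show 1 + pvDots cs - 1 = pvDots cs by omega, ih htail]
    · by_cases hO : c = 'O'
      · subst hO
        have hnod : ∀ j : Nat, cs[j]? ≠ some '.' := by
          intro j
          have := h 0 (j+1) (by omega) (by rfl)
          rwa [List.getElem?_cons_succ] at this
        have hz : pvDots ('O' :: cs) = 0 := by
          unfold pvDots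
          simp only [List.map_cons, List.sum_cons]
          rw [if_neg (by decide)]
          have := pv_dots_zero cs hnod
          unfold pvDots at this
          omega
        simp only [pySegPack]
        rw [if_pos (by simp), if_neg (by omega), hz]
        have := ih htail
        rw [pv_dots_zero cs hnod] at this
        rw [this]
      · have hns : (c == '.' || c == 'O') = false := by
          simp [hdot, hO]
        have heq : pvDots (c :: cs) = pvDots cs := by
          unfold pvDots
          simp only [List.map_cons, List.sum_cons]
          rw [if_neg (by simpa using hdot)]
          omega
        simp only [pySegPack]
        rw [hns, heq]
        simp only [Bool.false_eq_true, if_false]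
        rw [ih htail]

theorem pv_pack_guard (x : List Char) (h : 'O' ∉ x ∨ '.' ∉ x) :
    pySegPack (pvDots x) x = x := by
  apply pv_pack_id
  intro p q hpq hp hq
  rcases h with h | h
  · exact h (List.mem_of_getElem? hp)
  · exact h (List.mem_of_getElem? hq)

theorem pv_segOut_eq_pack (x : List Char) : pySegOut x = pySegPack (pvDots x) x := by
  unfold pySegOut
  split
  · rename_i hg
    simp only [Bool.or_eq_true, Bool.not_eq_eq_eq_not, Bool.not_true] at hg
    refine (pv_pack_guard x ?_).symm
    rcases hg with hg | hg
    · exact Or.inl (fun hm => by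
        have := (PySem.Chars.isIn_iff_infix (sub := ['O']) (s := x)).2 ((List.singleton_infix_iff _ _).2 hm)
        rw [hg] at this; cases this)
    · exact Or.inr (fun hm => by
        have := (PySem.Chars.isIn_iff_infix (sub := ['.']) (s := x)).2 ((List.singleton_infix_iff _ _).2 hm)
        rw [hg] at this; cases this)
  · rw [pvDots]

theorem pv_alt_swap (t : List Char) (o d : Nat)
    (hod : o < d) (hdl : d < t.length)
    (hoO : t[o]? = some 'O') (hdD : t[d]? = some '.')
    (hnh : ∀ k, o ≤ k → k ≤ d → t[k]? ≠ some '#') :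
    move_rocks_alt_chars ((t.set o '.').set d 'O') = move_rocks_alt_chars t := by
  induction hn : t.length using Nat.strong_induction_on generalizing t o d with
  | _ n ih =>
  subst hn
  set p : Char → Bool := fun c => c != '#' with hp
  have hsplit : t.takeWhile p ++ t.dropWhile p = t := List.takeWhile_append_dropWhile
  set x := t.takeWhile p with hxdef
  set r := t.dropWhile p with hrdef
  have hx_all : ∀ a ∈ x, p a = true := fun a ha => List.mem_takeWhile_imp ha
  have hrc := pv_drop_cases t
  rw [← hrdef] at hrc
  by_cases hdx : d < x.length
  · -- both updates inside the first segment
    have hox : o < x.length := by omega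
    have hset : (t.set o '.').set d 'O' = ((x.set o '.').set d 'O') ++ r := by
      rw [← hsplit, List.set_append, if_pos hox, List.set_append, if_pos (by simpa using hdx)]
    have hxo : x[o]? = t[o]? := by rw [← hsplit, List.getElem?_append_left hox]
    have hxd : x[d]? = t[d]? := by rw [← hsplit, List.getElem?_append_left hdx]
    have hx'_all : ∀ a ∈ (x.set o '.').set d 'O', p a = true := by
      intro a ha
      rcases List.mem_or_eq_of_mem_set ha with ha' | rfl
      · rcases List.mem_or_eq_of_mem_set ha' with ha'' | rfl
        · exact hx_all _ ha''
        · rfl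
      · rfl
    obtain ⟨htw, hdw⟩ := pv_tw_app ((x.set o '.').set d 'O') r hx'_all hrc
    obtain ⟨htw0, hdw0⟩ := pv_tw_app x r hx_all hrc
    rw [hsplit] at htw0 hdw0
    have hpack : pySegOut ((x.set o '.').set d 'O') = pySegOut x := by
      rw [pv_segOut_eq_pack, pv_segOut_eq_pack,
        pv_dots_set_set x o d (hxo ▸ hoO) (hxd ▸ hdD) (by omega)]
      exact pv_pack_congr _ _ (pv_swap_rel x o d (hxo ▸ hoO) (hxd ▸ hdD) (by omega)) _
    rcases hrc with hre | ⟨y, hre⟩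
    · rw [hset, pv_alt_nil _ (by rw [hdw, hre]), pv_alt_nil t (by rw [← hrdef, hre]), htw, ← hxdef, hpack]
    · rw [hset, pv_alt_cons _ '#' y (by rw [hdw, hre]), pv_alt_cons t '#' y (by rw [← hrdef, hre]), htw, ← hxdef, hpack]
  · by_cases hox : o < x.length
    · -- o in the first segment, d beyond it: impossible, '#' in between
      exfalso
      have hrne : r ≠ [] := by
        intro hre
        rw [hre, List.append_nil] at hsplit
        rw [← hsplit] at hdl
        omega
      rcases hrc with hre | ⟨y, hre⟩
      · exact hrne hre
      · have : t[x.length]? = some '#' := by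
          rw [← hsplit, List.getElem?_append_right (le_refl _), hre]
          simp
        exact hnh x.length (by omega) (by omega) this
    · -- both in the tail, past the first '#'
      have hrne : r ≠ [] := by
        intro hre
        rw [hre, List.append_nil] at hsplit
        rw [← hsplit] at hdl
        have := (List.getElem?_eq_some_iff.1 hoO).1
        omega
      rcases hrc with hre | ⟨y, hre⟩
      · exact absurd hre hrne
      · have hto : x.length ≤ o := by omega
        have honx : o ≠ x.length := by
          intro he
          have : t[x.length]? = some '#' := by
            rw [← hsplit, List.getElem?_append_right (le_refl _), hre]; simp
          rw [← he, hoO] at this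
          cases this
        have hox1 : x.length + 1 ≤ o := by omega
        -- positions inside y
        have hgy : ∀ i : Nat, t[x.length + 1 + i]? = y[i]? := by
          intro i
          rw [← hsplit, List.getElem?_append_right (by omega), hre]
          rw [show x.length + 1 + i - x.length = i + 1 by omega, List.getElem?_cons_succ]
        have htlen : t.length = x.length + 1 + y.length := by
          rw [← hsplit, hre]; simp; omega
        set o' := o - x.length - 1 with ho'def
        set d' := d - x.length - 1 with hd'def
        have ho'i : x.length + 1 + o' = o := by omega
        have hd'i : x.length + 1 + d' = d := by omega
        have hyo : y[o']? = some 'O' := by rw [← hgy, ho'i]; exact hoO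
        have hyd : y[d']? = some '.' := by rw [← hgy, hd'i]; exact hdD
        have hset1 : t.set o '.' = x ++ '#' :: (y.set o' '.') := by
          rw [← hsplit, List.set_append, if_neg (by omega), hre,
            show o - x.length = o' + 1 by omega, List.set_cons_succ]
        have hset2 : (t.set o '.').set d 'O' = x ++ '#' :: ((y.set o' '.').set d' 'O') := by
          rw [hset1, List.set_append, if_neg (by simp; omega),
            show d - x.length = d' + 1 by omega, List.set_cons_succ]
        obtain ⟨htw, hdw⟩ := pv_tw_app x ('#' :: ((y.set o' '.').set d' 'O')) hx_all (Or.inr ⟨_, rfl⟩)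
        obtain ⟨htw0, hdw0⟩ := pv_tw_app x ('#' :: y) hx_all (Or.inr ⟨_, rfl⟩)
        rw [hset2, pv_alt_cons _ '#' _ hdw, pv_alt_cons t '#' y (by rw [← hrdef, hre]), htw]
        rw [show List.takeWhile (fun c => c != '#') t = x from by rw [hxdef]]
        congr 1
        simp only [List.cons.injEq, true_and]
        exact ih y.length (by omega) y o' d' (by omega) (by omega) hyo hyd
          (fun k hk1 hk2 => by rw [← hgy]; exact hnh _ (by omega) (by omega)) rfl

theorem pv_alt_id (t : List Char)
    (h : ∀ p q : Nat, p < q → t[p]? = some 'O' → t[q]? = some '.' →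
         ∃ r, p < r ∧ r ≤ q ∧ t[r]? = some '#') :
    move_rocks_alt_chars t = t := by
  induction hn : t.length using Nat.strong_induction_on generalizing t with
  | _ n ih =>
  subst hn
  set p : Char → Bool := fun c => c != '#' with hp
  have hsplit : t.takeWhile p ++ t.dropWhile p = t := List.takeWhile_append_dropWhile
  set x := t.takeWhile p with hxdef
  set r := t.dropWhile p with hrdef
  have hx_all : ∀ a ∈ x, p a = true := fun a ha => List.mem_takeWhile_imp ha
  have hrc := pv_drop_cases t
  rw [← hrdef] at hrc
  have hpack : pySegOut x = x := by
    rw [pv_segOut_eq_pack]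
    apply pv_pack_id
    intro a b hab ha hb
    have hbx : b < x.length := (List.getElem?_eq_some_iff.1 hb).1
    have hta : t[a]? = some 'O' := by rw [← hsplit, List.getElem?_append_left (by omega)]; exact ha
    have htb : t[b]? = some '.' := by rw [← hsplit, List.getElem?_append_left hbx]; exact hb
    obtain ⟨r0, hr1, hr2, hr3⟩ := h a b hab hta htb
    have hr0x : r0 < x.length := by omega
    have : x[r0]? = some '#' := by rw [← hsplit, List.getElem?_append_left hr0x] at hr3; exact hr3
    have hmem : '#' ∈ x := List.mem_of_getElem? this
    have := hx_all '#' hmem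
    rw [hp] at this
    simp at this
  rcases hrc with hre | ⟨y, hre⟩
  · rw [pv_alt_nil t (by rw [← hrdef, hre]), show List.takeWhile (fun c => c != '#') t = x from by rw [hxdef], hpack]
    rw [← hsplit, hre, List.append_nil]
  · have hgy : ∀ i : Nat, t[x.length + 1 + i]? = y[i]? := by
      intro i
      rw [← hsplit, List.getElem?_append_right (by omega), hre]
      rw [show x.length + 1 + i - x.length = i + 1 by omega, List.getElem?_cons_succ]
    have htlen : t.length = x.length + 1 + y.length := by
      rw [← hsplit, hre]; simp; omega
    rw [pv_alt_cons t '#' y (by rw [← hrdef, hre]), show List.takeWhile (fun c => c != '#') t = x from by rw [hxdef], hpack]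
    have hy : move_rocks_alt_chars y = y := by
      apply ih y.length (by omega) y _ rfl
      intro a b hab ha hb
      obtain ⟨r0, hr1, hr2, hr3⟩ := h (x.length + 1 + a) (x.length + 1 + b) (by omega) (by rw [hgy]; exact ha) (by rw [hgy]; exact hb)
      refine ⟨r0 - x.length - 1, by omega, by omega, ?_⟩
      rw [← hgy, show x.length + 1 + (r0 - x.length - 1) = r0 by omega]
      exact hr3
    rw [hy, ← hsplit, hre]


-- ---- the main loop invariant ----

theorem pv_fold_eq_alt (os : List Nat) (t : List Char)
    (hs : os.Pairwise (· < ·))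
    (hO : ∀ o ∈ os, t[o]? = some 'O')
    (hin : ∀ p : Nat, t[p]? = some 'O' → p ∉ os →
       ∀ q : Nat, p < q → t[q]? = some '.' → ∃ r, p < r ∧ r ≤ q ∧ t[r]? = some '#') :
    os.foldl (fun (acc : List Char) (o : Nat) => move_rocks_step acc (o : Int)) t = move_rocks_alt_chars t := by
  induction os generalizing t with
  | nil =>
    exact (pv_alt_id t (fun p q hpq hp hq => hin p hp (by simp) q hpq hq)).symm
  | cons o rest ih =>
    have ho : t[o]? = some 'O' := hO o (by simp)
    have holt : o < t.length := (List.getElem?_eq_some_iff.1 ho).1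
    have hrest_gt : ∀ r ∈ rest, o < r := (List.pairwise_cons.1 hs).1
    have hs' : rest.Pairwise (· < ·) := (List.pairwise_cons.1 hs).2
    -- the first '#' at or after o (t.length if none)
    set s := o + (t.drop o).findIdx (fun c => c == '#') with hsdef
    have hfle : (t.drop o).findIdx (fun c => c == '#') ≤ (t.drop o).length := List.findIdx_le_length
    have hsle : s ≤ t.length := by
      rw [hsdef]
      have : (t.drop o).length = t.length - o := by simp
      omega
    have hget_drop : ∀ (i : Nat) (hi : i < t.length - o), t[o + i]? = some ((t.drop o)[i]'(by simp; omega)) := by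
      intro i hi
      rw [← List.getElem?_drop, List.getElem?_eq_getElem (by simp; omega)]
    have hnh : ∀ k, o ≤ k → k < s → t[k]? ≠ some '#' := by
      intro k hk1 hk2 hk3
      have hkl : k < t.length := by omega
      have h1 := hget_drop (k - o) (by omega)
      rw [show o + (k - o) = k by omega, hk3] at h1
      have h2 := List.not_of_lt_findIdx (p := fun c => c == '#') (xs := t.drop o) (i := k - o) (by omega)
      simp only [beq_eq_false_iff_ne] at h2
      exact h2 ((Option.some_inj.1 h1).symm)
    have hb : s = t.length ∨ t[s]? = some '#' := by
      by_cases hfl : (t.drop o).findIdx (fun c => c == '#') < (t.drop o).length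
      · right
        have := List.findIdx_getElem (w := hfl) (xs := t.drop o) (p := fun c => c == '#')
        have h1 := hget_drop ((t.drop o).findIdx (fun c => c == '#')) (by simp at hfl; omega)
        rw [← hsdef] at h1
        simp only [beq_iff_eq] at this
        rw [this] at h1
        exact h1
      · left
        have : (t.drop o).length = t.length - o := by simp
        omega
    have hos : o ≤ s := by omega
    by_cases hdot : ∃ k, o ≤ k ∧ k < s ∧ t[k]? = some '.'
    · obtain ⟨k0, hk01, hk02, hk03⟩ := hdot
      set P : Nat → Prop := fun k => o ≤ k ∧ t[k]? = some '.' with hPdef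
      have hs1 : 1 ≤ s := by omega
      set d := Nat.findGreatest P (s - 1) with hddef
      have hPd : P d := Nat.findGreatest_spec (P := P) (n := s - 1) (m := k0) (by omega) (show P k0 from ⟨hk01, hk03⟩)
      have hdle : d ≤ s - 1 := Nat.findGreatest_le (s - 1)
      obtain ⟨hod, hd⟩ := hPd
      have hdlt : d < t.length := (List.getElem?_eq_some_iff.1 hd).1
      have hmax : ∀ k, d < k → k < s → t[k]? ≠ some '.' := by
        intro k hk1 hk2 hk3
        have hng : ¬ P k := Nat.findGreatest_is_greatest (by rw [← hddef]; omega) (by omega)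
        exact hng ⟨by omega, hk3⟩
      have hone : o < d := by
        rcases Nat.lt_or_ge o d with h | h
        · exact h
        · exfalso
          have : o = d := by omega
          rw [← this, ho] at hd
          cases hd
      have hstep : move_rocks_step t (o : Int) = (t.set o '.').set d 'O' :=
        pv_step_some t o s d hos hsle hnh hb ho hod (by omega) hd hmax
      set t' := (t.set o '.').set d 'O' with ht'def
      have hget' : ∀ i : Nat, t'[i]? = if i = d then some 'O' else if i = o then some '.' else t[i]? := by
        intro i
        by_cases hid : i = d
        · subst hid
          rw [ht'def, List.getElem?_set_self (by simp; omega), if_pos rfl]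
        · by_cases hio : i = o
          · subst hio
            rw [ht'def, List.getElem?_set_ne (fun h => hid h.symm), List.getElem?_set_self (by omega), if_neg hid, if_pos rfl]
          · rw [ht'def, List.getElem?_set_ne (fun h => hid h.symm), List.getElem?_set_ne (fun h => hio h.symm), if_neg hid, if_neg hio]
      have halt : move_rocks_alt_chars t' = move_rocks_alt_chars t :=
        pv_alt_swap t o d hone hdlt ho hd (fun k hk1 hk2 => hnh k hk1 (by omega))
      have hO' : ∀ r ∈ rest, t'[r]? = some 'O' := by
        intro r hr
        have hor := hrest_gt r hr
        have htr := hO r (by simp [hr])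
        rw [hget', if_neg (by intro h; rw [h, hd] at htr; cases htr), if_neg (by omega)]
        exact htr
      have hin' : ∀ p : Nat, t'[p]? = some 'O' → p ∉ rest →
          ∀ q : Nat, p < q → t'[q]? = some '.' → ∃ r, p < r ∧ r ≤ q ∧ t'[r]? = some '#' := by
        intro p hp hpr q hpq hq
        have hslen : s < t.length → t[s]? = some '#' := by
          intro h; rcases hb with h' | h'
          · omega
          · exact h'
        by_cases hpd : p = d
        · subst hpd
          have hqne : q ≠ d := by omega
          have hqno : q ≠ o := by omega
          rw [hget', if_neg hqne, if_neg hqno] at hq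
          have hql : q < t.length := (List.getElem?_eq_some_iff.1 hq).1
          have hqs : s ≤ q := by
            by_contra hqs
            exact hmax q hpq (by omega) hq
          refine ⟨s, by omega, by omega, ?_⟩
          rw [hget', if_neg (by omega), if_neg (by omega)]
          exact hslen (by omega)
        · by_cases hpo : p = o
          · exfalso
            rw [hget', if_neg hpd, if_pos hpo] at hp
            cases hp
          · rw [hget', if_neg hpd, if_neg hpo] at hp
            have hpnos : p ∉ (o :: rest) := by
              simp only [List.mem_cons, not_or]
              exact ⟨hpo, hpr⟩
            by_cases hqd : q = d
            · exfalso
              rw [hget', if_pos hqd] at hq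
              cases hq
            · by_cases hqo : q = o
              · obtain ⟨r1, hr11, hr12, hr13⟩ := hin p hp hpnos d (by omega) hd
                have hr1o : r1 < o := by
                  by_contra hc
                  exact hnh r1 (by omega) (by omega) hr13
                refine ⟨r1, by omega, by omega, ?_⟩
                rw [hget', if_neg (by intro h; rw [h, hd] at hr13; cases hr13), if_neg (by omega)]
                exact hr13
              · rw [hget', if_neg hqd, if_neg hqo] at hq
                obtain ⟨r1, hr11, hr12, hr13⟩ := hin p hp hpnos q hpq hq
                refine ⟨r1, hr11, hr12, ?_⟩
                rw [hget', if_neg (by intro h; rw [h, hd] at hr13; cases hr13),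
                  if_neg (by intro h; rw [h, ho] at hr13; cases hr13)]
                exact hr13
      calc (o :: rest).foldl (fun (acc : List Char) (o : Nat) => move_rocks_step acc (o : Int)) t
          = rest.foldl (fun (acc : List Char) (o : Nat) => move_rocks_step acc (o : Int)) t' := by
            rw [List.foldl_cons, hstep]
        _ = move_rocks_alt_chars t' := ih t' hs' hO' hin'
        _ = move_rocks_alt_chars t := halt
    · have hnd : ∀ k, o ≤ k → k < s → t[k]? ≠ some '.' := by
        intro k hk1 hk2 hk3
        exact hdot ⟨k, hk1, hk2, hk3⟩
      have hstep : move_rocks_step t (o : Int) = t :=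
        pv_step_none t o s hos hsle hnh hb hnd
      have hin' : ∀ p : Nat, t[p]? = some 'O' → p ∉ rest →
          ∀ q : Nat, p < q → t[q]? = some '.' → ∃ r, p < r ∧ r ≤ q ∧ t[r]? = some '#' := by
        intro p hp hpr q hpq hq
        by_cases hpo : p = o
        · subst hpo
          have hql : q < t.length := (List.getElem?_eq_some_iff.1 hq).1
          have hqs : s ≤ q := by
            by_contra hqs
            exact hnd q (by omega) (by omega) hq
          have hps : p < s := by
            rcases Nat.lt_or_ge p s with h | h
            · exact h
            · exfalso
              rcases hb with h' | h'
              · omega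
              · have hps' : p = s ∨ s < p := by omega
                rcases hps' with h'' | h''
                · rw [← h''] at h'; rw [h'] at hp; simp at hp
                · omega
          refine ⟨s, by omega, by omega, ?_⟩
          rcases hb with h' | h'
          · omega
          · exact h'
        · exact hin p hp (by simp only [List.mem_cons, not_or]; exact ⟨hpo, hpr⟩) q hpq hq
      rw [List.foldl_cons, hstep]
      exact ih t hs' (fun r hr => hO r (by simp [hr])) hin'

theorem pv_chars_eq (cs : List Char) : move_rocks_chars cs = move_rocks_alt_chars cs := by
  unfold move_rocks_chars
  rw [PySem.List.len_eq, PySem.List.pyRange_zero_natCast, List.filter_map, List.foldl_map]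
  apply pv_fold_eq_alt
  · exact List.Pairwise.filter _ List.pairwise_lt_range
  · intro o ho2
    have := (List.mem_filter.1 ho2).2
    simp only [Function.comp, PySem.List.pyGet?_natCast, beq_iff_eq] at this
    exact this
  · intro p hp hnot q hpq hq
    exfalso
    apply hnot
    apply List.mem_filter.2
    refine ⟨List.mem_range.2 ((List.getElem?_eq_some_iff.1 hp).1), ?_⟩
    simp only [Function.comp, PySem.List.pyGet?_natCast, beq_iff_eq]
    exact hp

-- ===== VERDICT (by name: the statement is the Claim_ definition above) =====
theorem move_rocks_spec : Claim_equal_move_rocks := by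
  intro line _
  unfold Spec_move_rocks move_rocks move_rocks_alt
  rw [pv_chars_eq]
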